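-- pv_equiv track=rewrite | github.com/EventGhost/EventGhost | eg/WinApi/ir_class_ioctl/ioctl.py | _get_high_bit
-- ===== SOURCE A (Python) =====
-- def _get_high_bit(mask, bit_count):
--     count = 0
--     for i in range(32):
--         bit_mask = 1 << i
--         if mask & bit_mask:
--             if count + 1 == bit_count:
--                 return bit_mask
--             else:
--                 count += 1
--
--     return 0
-- ===== SOURCE B (Python) =====
-- def _get_high_bit(mask, bit_count):
--     if bit_count < 1:
--         return 0
--     m = mask & 0xFFFFFFFF
--     for _ in range(bit_count - 1):
--         m &= m - 1
--         if not m: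
--             return 0
--     return m & -m
-- ===== Notes on version B (the rewrite author's own statement) =====
-- stated objective: alternative
-- what changed: Replaces A's scan over all 32 bit positions with a running counter by bit-twiddling: reduce the mask to its low 32 bits, strip the lowest set bit (m &= m-1, Kernighan) bit_count-1 times with early exit when the mask empties, and return the lowest remaining set bit via m & -m; no bit positions are ever enumerated.
import Mathlib
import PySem

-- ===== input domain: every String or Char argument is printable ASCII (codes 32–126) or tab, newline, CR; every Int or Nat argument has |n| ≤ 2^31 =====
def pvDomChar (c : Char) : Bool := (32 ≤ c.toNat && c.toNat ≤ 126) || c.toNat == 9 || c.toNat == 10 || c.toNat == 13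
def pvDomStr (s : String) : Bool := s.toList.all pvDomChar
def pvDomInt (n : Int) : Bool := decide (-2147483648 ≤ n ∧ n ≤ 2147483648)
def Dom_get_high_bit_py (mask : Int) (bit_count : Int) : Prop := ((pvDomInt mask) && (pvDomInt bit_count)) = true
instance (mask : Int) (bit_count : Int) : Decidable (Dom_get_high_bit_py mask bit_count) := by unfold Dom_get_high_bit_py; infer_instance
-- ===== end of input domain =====

-- B replaces A's scan over the 32 bit positions by bit-twiddling: it masks to the low 32
-- bits, strips the lowest set bit (m &= m-1) bit_count-1 times with early exit, and
-- returns the lowest remaining set bit m & -m (objective: alternative algorithm).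

-- ===== PORT A =====
-- 1 << i (i is a range(32) index, so nonnegative)
def bitAt (i : Int) : Int := (1 : Int) <<< i.toNat

-- the for-loop with its running counter and early return, as structural recursion over range(32)
def getHighBitLoop (mask : Int) (bit_count : Int) : List Int → Int → Int
  | [], _ => 0
  | i :: rest, count =>
    let bit_mask : Int := bitAt i
    if PySem.Int.band mask bit_mask ≠ 0 then
      if count + 1 = bit_count then bit_mask
      else getHighBitLoop mask bit_count rest (count + 1)
    else getHighBitLoop mask bit_count rest count

def get_high_bit_py (mask : Int) (bit_count : Int) : Int :=
  getHighBitLoop mask bit_count (PySem.List.pyRange 0 32 1) 0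

-- ===== PORT B =====
-- `for _ in range(bit_count - 1): m &= m - 1; if not m: return 0` as fuel recursion;
-- the fuel is exhausted only after the final `return m & -m`
def clearLoop : Nat → Int → Int
  | 0, m => PySem.Int.band m (-m)
  | n + 1, m =>
    let m' := PySem.Int.band m (m - 1)
    if m' = 0 then 0 else clearLoop n m'

def get_high_bit_py_alt (mask : Int) (bit_count : Int) : Int :=
  if bit_count < 1 then 0
  else clearLoop (bit_count - 1).toNat (PySem.Int.band mask 4294967295)

-- ===== PRECONDITION & SPEC =====
def Spec_get_high_bit_py (mask : Int) (bit_count : Int) (out : Int) : Prop := out = get_high_bit_py_alt mask bit_count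
instance (mask : Int) (bit_count : Int) (out : Int) : Decidable (Spec_get_high_bit_py mask bit_count out) := by unfold Spec_get_high_bit_py; infer_instance

-- ===== CLAIM (what is proved, stated in full; the proofs are below) =====
def Claim_equal_get_high_bit_py : Prop := ∀ (mask : Int) (bit_count : Int), Dom_get_high_bit_py mask bit_count → Spec_get_high_bit_py mask bit_count (get_high_bit_py mask bit_count)

-- ===== LEMMAS AND PROOFS =====

-- Python's `mask & 0xFFFFFFFF`, as a natural number
def pyMask (mask : Int) : Nat := (PySem.Int.band mask 4294967295).toNat

-- the indices (< 32) of the set bits of m, in increasing order, and the table of bit masks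
def natBits (m : Nat) : List Nat := (List.range 32).filter m.testBit
def table (m : Nat) : List Int := (natBits m).map (fun i => ((2 : Int) ^ i))

-- A's loop with counter `count` equals table-then-index at position bit_count - count - 1
theorem getHighBitLoop_eq (mask bit_count : Int) :
    ∀ (l : List Int) (count : Int),
      getHighBitLoop mask bit_count l count =
        (let bits := (l.filter (fun i => PySem.Int.band mask (bitAt i) ≠ 0)).map
            (fun i => bitAt i)
         if 1 ≤ bit_count - count ∧ bit_count - count ≤ bits.length then
           (PySem.List.pyGet? bits (bit_count - count - 1)).getD 0
         else 0) := by
  intro l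
  induction l with
  | nil => intro count; simp only [getHighBitLoop, List.filter_nil, List.map_nil, List.length_nil]; rw [if_neg (by omega)]
  | cons i rest ih =>
    intro count
    simp only [getHighBitLoop, List.filter_cons]
    by_cases hb : PySem.Int.band mask (bitAt i) ≠ 0
    · rw [if_pos hb, if_pos (show (decide (PySem.Int.band mask (bitAt i) ≠ 0)) = true by simpa using hb)]
      simp only [List.map_cons]
      by_cases hc : count + 1 = bit_count
      · have h1 : bit_count - count = 1 := by omega
        simp [hc, h1]
      · rw [if_neg hc, ih (count + 1)]
        simp only
        set bits := (rest.filter (fun i => PySem.Int.band mask (bitAt i) ≠ 0)).map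
            (fun i => bitAt i) with hbits
        by_cases hin : 1 ≤ bit_count - (count + 1) ∧ bit_count - (count + 1) ≤ bits.length
        · rw [if_pos hin, if_pos (by simp only [List.length_cons]; omega)]
          have hcast : bit_count - count - 1 = ((bit_count - (count + 1) - 1).toNat : Int) + 1 := by omega
          have hcast2 : ((bit_count - (count + 1) - 1).toNat : Int) = bit_count - (count + 1) - 1 := by omega
          rw [hcast, PySem.List.pyGet?_cons_succ, hcast2]
        · rw [if_neg hin, if_neg (by simp only [List.length_cons]; omega)]
    · rw [if_neg hb, if_neg (show ¬ (decide (PySem.Int.band mask (bitAt i) ≠ 0)) = true by simpa using hb), ih count]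

theorem pyRange32 : PySem.List.pyRange 0 32 1 = (List.range 32).map (fun j : Nat => (j : Int)) := by
  decide

-- the per-bit bridge: testing bit j of mask in Python equals testing bit j of pyMask mask
theorem band_bit_iff (mask : Int) (j : Nat) (hj : j < 32) :
    (PySem.Int.band mask ((2 : Int) ^ j) ≠ 0) ↔ (pyMask mask).testBit j = true := by
  have h2 : ((2 : Int) ^ j) = ((2 ^ j : Nat) : Int) := by push_cast; ring
  by_cases hm : 0 ≤ mask
  · rw [pyMask]
    simp only [PySem.Int.band, h2, if_pos hm, if_pos (by positivity : (0:Int) ≤ ((2 ^ j : Nat) : Int)),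
      if_pos (by decide : (0:Int) ≤ 4294967295)]
    have hM : (4294967295 : Int).toNat = 2 ^ 32 - 1 := by rfl
    rw [Int.toNat_natCast, hM, Int.toNat_natCast, Nat.testBit_and, Nat.testBit_two_pow_sub_one,
      Nat.and_two_pow]
    rcases h : mask.toNat.testBit j with _ | _
    · simp
    · simp [hj]
  · rw [pyMask]
    simp only [PySem.Int.band, h2, if_neg hm, if_pos (by positivity : (0:Int) ≤ ((2 ^ j : Nat) : Int)),
      if_pos (by decide : (0:Int) ≤ 4294967295)]
    set n : Nat := (-mask - 1).toNat with hn
    have hM : (4294967295 : Int).toNat = 2 ^ 32 - 1 := by rfl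
    have hand : (2 ^ 32 - 1) &&& n ≤ 2 ^ 32 - 1 := Nat.and_le_left
    have hsub : 2 ^ 32 - 1 - ((2 ^ 32 - 1) &&& n) = 2 ^ 32 - (((2 ^ 32 - 1) &&& n) + 1) := by omega
    rw [Int.toNat_natCast, hM, Int.toNat_natCast, hsub,
      Nat.testBit_two_pow_sub_succ (by omega), Nat.testBit_and, Nat.testBit_two_pow_sub_one,
      Nat.two_pow_and]
    rcases h : n.testBit j with _ | _
    · simp [hj]
    · simp [hj]

theorem pyMask_lt (mask : Int) : pyMask mask < 2 ^ 32 := by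
  rw [pyMask]
  by_cases hm : 0 ≤ mask
  · simp only [PySem.Int.band, if_pos hm, if_pos (by decide : (0:Int) ≤ 4294967295)]
    rw [Int.toNat_natCast]
    exact Nat.and_lt_two_pow _ (by norm_num)
  · simp only [PySem.Int.band, if_neg hm, if_pos (by decide : (0:Int) ≤ 4294967295)]
    rw [Int.toNat_natCast]
    have : (4294967295 : Int).toNat = 2 ^ 32 - 1 := by rfl
    omega

-- A's table of set-bit masks is `table (pyMask mask)`
theorem tableA_eq (mask : Int) :
    ((PySem.List.pyRange 0 32 1).filter (fun i => PySem.Int.band mask (bitAt i) ≠ 0)).map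
      (fun i => bitAt i) = table (pyMask mask) := by
  rw [pyRange32, List.filter_map, List.map_map, table, natBits]
  have hbit : ∀ j : Nat, bitAt (j : Int) = (2 : Int) ^ j := by
    intro j
    rw [bitAt, Int.toNat_natCast, Int.shiftLeft_eq, one_mul]
  rw [List.filter_congr (q := fun j : Nat => (pyMask mask).testBit j)
      (by intro j hjmem
          simp only [List.mem_range] at hjmem
          simp only [Function.comp_apply, hbit]
          rw [show (pyMask mask).testBit j = decide ((pyMask mask).testBit j = true) by simp]
          simp only [decide_eq_decide]
          exact band_bit_iff mask j hjmem)]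
  · apply List.map_congr_left
    intro j _
    exact hbit j

-- every m ≠ 0 is 2^i * o with o odd
theorem exists_odd_factor : ∀ m : Nat, m ≠ 0 → ∃ i o, o % 2 = 1 ∧ m = 2 ^ i * o := by
  intro m
  induction m using Nat.strong_induction_on with
  | _ m ih =>
    intro hm
    by_cases hpar : m % 2 = 1
    · exact ⟨0, m, hpar, by simp⟩
    · obtain ⟨i, o, ho, heq⟩ := ih (m / 2) (by omega) (by omega)
      refine ⟨i + 1, o, ho, ?_⟩
      have h2 : 2 ^ (i + 1) * o = 2 * (2 ^ i * o) := by ring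
      omega

-- Kernighan's identity: m & (m-1) clears the lowest set bit
theorem strip_eq (i o : Nat) (ho : o % 2 = 1) :
    (2 ^ i * o) &&& (2 ^ i * o - 1) = 2 ^ i * (o - 1) := by
  have hpow : 0 < 2 ^ i := Nat.two_pow_pos i
  have hsub : 2 ^ i * o - 1 = 2 ^ i * (o - 1) + (2 ^ i - 1) := by
    have : 2 ^ i * o = 2 ^ i * (o - 1) + 2 ^ i := by
      cases o with
      | zero => omega
      | succ o' => simp [Nat.mul_succ]
    omega
  apply Nat.eq_of_testBit_eq
  intro j
  rw [Nat.testBit_and, hsub, Nat.testBit_two_pow_mul_add _ (by omega),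
    Nat.testBit_two_pow_mul, Nat.testBit_two_pow_mul]
  by_cases hij : j < i
  · have hni : ¬ i ≤ j := by omega
    simp [if_pos hij, hni]
  · have hge : i ≤ j := by omega
    rw [if_neg hij]
    simp only [ge_iff_le, decide_eq_true hge, Bool.true_and]
    cases hs : j - i with
    | zero =>
      have h0 : (o - 1) % 2 ≠ 1 := by omega
      simp [Nat.testBit_zero, h0]
    | succ t =>
      rw [Nat.testBit_add_one, Nat.testBit_add_one, (show o / 2 = (o - 1) / 2 by omega)]
      exact Bool.and_self _

-- m & -m is the lowest set bit
theorem lowbit_eq (i o : Nat) (ho : o % 2 = 1) :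
    PySem.Int.band ((2 ^ i * o : Nat) : Int) (-((2 ^ i * o : Nat) : Int)) = (2 : Int) ^ i := by
  have hpow : 0 < 2 ^ i := Nat.two_pow_pos i
  have hpos : 0 < 2 ^ i * o := by
    have ho' : 0 < o := by omega
    exact Nat.mul_pos hpow ho'
  simp only [PySem.Int.band,
    if_pos (by positivity : (0:Int) ≤ ((2 ^ i * o : Nat) : Int)),
    if_neg (by omega : ¬ (0:Int) ≤ -((2 ^ i * o : Nat) : Int))]
  have h1 : (-(-((2 ^ i * o : Nat) : Int)) - 1).toNat = 2 ^ i * o - 1 := by omega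
  simp only [h1, Int.toNat_natCast]
  rw [strip_eq i o ho]
  have h2 : 2 ^ i * o - 2 ^ i * (o - 1) = 2 ^ i := by
    have : 2 ^ i * o = 2 ^ i * (o - 1) + 2 ^ i := by
      cases o with
      | zero => omega
      | succ o' => simp [Nat.mul_succ]
    omega
  rw [h2]
  push_cast
  ring

theorem filter_range_cons (p q : Nat → Bool) (i : Nat) :
    ∀ N, i < N → p i = true → q i = false →
      (∀ j, j < i → p j = false) → (∀ j, j < i → q j = false) →
      (∀ j, i < j → p j = q j) →
      (List.range N).filter p = i :: (List.range N).filter q := by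
  intro N
  induction N with
  | zero => intro h; omega
  | succ n ih =>
    intro hiN hp hq hlp hlq hh
    rw [List.range_succ, List.filter_append, List.filter_append]
    by_cases hni : i = n
    · subst hni
      have h1 : (List.range i).filter p = [] := List.filter_eq_nil_iff.mpr (by
        intro a ha; simp only [List.mem_range] at ha; simp [hlp a ha])
      have h2 : (List.range i).filter q = [] := List.filter_eq_nil_iff.mpr (by
        intro a ha; simp only [List.mem_range] at ha; simp [hlq a ha])
      simp [h1, h2, List.filter, hp, hq]
    · have hin : i < n := by omega
      rw [ih hin hp hq hlp hlq hh]
      have hfn : List.filter p [n] = List.filter q [n] := by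
        simp only [List.filter, hh n (by omega)]
      rw [hfn, List.cons_append]

-- stripping the lowest set bit removes the head of the table
theorem natBits_cons (i o : Nat) (ho : o % 2 = 1) (hm : 2 ^ i * o < 2 ^ 32) :
    natBits (2 ^ i * o) = i :: natBits (2 ^ i * (o - 1)) := by
  have hpow : 0 < 2 ^ i := Nat.two_pow_pos i
  have hi32 : i < 32 := by
    by_contra h
    have h1 : 2 ^ 32 ≤ 2 ^ i := Nat.pow_le_pow_right (by norm_num) (by omega)
    have h2 : 2 ^ i ≤ 2 ^ i * o := Nat.le_mul_of_pos_right _ (by omega)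
    omega
  apply filter_range_cons _ _ i 32 hi32
  · rw [Nat.testBit_two_pow_mul]
    simp [Nat.testBit_zero, ho]
  · rw [Nat.testBit_two_pow_mul]
    simp [Nat.testBit_zero]
    omega
  · intro j hj
    rw [Nat.testBit_two_pow_mul]
    simp only [ge_iff_le, decide_eq_false (by omega : ¬ i ≤ j), Bool.false_and]
  · intro j hj
    rw [Nat.testBit_two_pow_mul]
    simp only [ge_iff_le, decide_eq_false (by omega : ¬ i ≤ j), Bool.false_and]
  · intro j hj
    rw [Nat.testBit_two_pow_mul, Nat.testBit_two_pow_mul]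
    cases hs : j - i with
    | zero => exact absurd hs (by omega)
    | succ t =>
      rw [Nat.testBit_add_one, Nat.testBit_add_one, (show o / 2 = (o - 1) / 2 by omega)]

-- B's strip loop indexes the table of set-bit masks
theorem clearLoop_eq : ∀ (fuel : Nat) (m : Nat), m < 2 ^ 32 →
    clearLoop fuel (m : Int) = ((table m)[fuel]?).getD 0 := by
  intro fuel
  induction fuel with
  | zero =>
    intro m hm
    by_cases h0 : m = 0
    · subst h0
      have ht : table 0 = [] := by
        rw [table, natBits]
        simp [List.filter_eq_nil_iff, Nat.zero_testBit]
      norm_num [clearLoop, ht, PySem.Int.band]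
    · obtain ⟨i, o, ho, heq⟩ := exists_odd_factor m h0
      subst heq
      rw [clearLoop, lowbit_eq i o ho, table, natBits_cons i o ho hm]
      simp
  | succ n ih =>
    intro m hm
    by_cases h0 : m = 0
    · subst h0
      have ht : table 0 = [] := by
        rw [table, natBits]
        simp [List.filter_eq_nil_iff, Nat.zero_testBit]
      norm_num [clearLoop, ht, PySem.Int.band]
    · obtain ⟨i, o, ho, heq⟩ := exists_odd_factor m h0
      subst heq
      have hpos : 0 < 2 ^ i * o :=
        Nat.mul_pos (Nat.two_pow_pos i) (by omega)
      have h1 : ((2 ^ i * o : Nat) : Int) - 1 = ((2 ^ i * o - 1 : Nat) : Int) := by omega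
      rw [clearLoop]
      simp only [h1, PySem.Int.band_natCast, strip_eq i o ho]
      have htab : table (2 ^ i * o) = (2 : Int) ^ i :: table (2 ^ i * (o - 1)) := by
        rw [table, natBits_cons i o ho hm, List.map_cons, table]
      by_cases hz : 2 ^ i * (o - 1) = 0
      · rw [hz]
        have ht : table (2 ^ i * (o - 1)) = [] := by
          rw [hz, table, natBits]
          simp [List.filter_eq_nil_iff, Nat.zero_testBit]
        simp [htab, ht]
      · rw [if_neg (by exact_mod_cast hz)]
        rw [ih (2 ^ i * (o - 1)) (by
          have : 2 ^ i * (o - 1) ≤ 2 ^ i * o := Nat.mul_le_mul_left _ (by omega)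
          omega)]
        rw [htab, List.getElem?_cons_succ]

theorem get_high_bit_py_eq (mask bit_count : Int) :
    get_high_bit_py mask bit_count = get_high_bit_py_alt mask bit_count := by
  rw [get_high_bit_py, getHighBitLoop_eq]
  simp only [Int.sub_zero]
  rw [tableA_eq, get_high_bit_py_alt]
  have hpm : PySem.Int.band mask 4294967295 = ((pyMask mask : Nat) : Int) := by
    rw [pyMask, Int.toNat_of_nonneg]
    rw [PySem.Int.band_comm]
    exact PySem.Int.band_nonneg_of_nonneg_left mask (by norm_num)
  have hlt := pyMask_lt mask
  by_cases hk : bit_count < 1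
  · rw [if_neg (by omega : ¬ (1 ≤ bit_count ∧ bit_count ≤ ((table (pyMask mask)).length : Int))), if_pos hk]
  · rw [if_neg hk, hpm, clearLoop_eq _ (pyMask mask) hlt]
    by_cases hle : bit_count ≤ ((table (pyMask mask)).length : Int)
    · rw [if_pos ⟨by omega, hle⟩]
      have hc : bit_count - 1 = (((bit_count - 1).toNat : Nat) : Int) := by omega
      rw [hc, PySem.List.pyGet?_natCast]
      simp [Int.toNat_natCast]
    · rw [if_neg (by omega : ¬ (1 ≤ bit_count ∧ bit_count ≤ ((table (pyMask mask)).length : Int)))]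
      have hnone : (table (pyMask mask))[(bit_count - 1).toNat]? = none := by
        rw [List.getElem?_eq_none]
        omega
      rw [hnone]
      rfl

-- ===== VERDICT (by name: the statement is the Claim_ definition above) =====
theorem get_high_bit_py_spec : Claim_equal_get_high_bit_py := by
  intro mask bit_count _
  exact get_high_bit_py_eq mask bit_count
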